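-- pv_equiv track=rewrite | github.com/hubert-wojtowicz/Google-KickStart-competition | 2020-round-b/robot-path-decoding-11pts-16pts/robot-path-decoding.py | get_displacement
-- ===== SOURCE A (Python) =====
-- DIRECTIONS = {"W": (-1, 0), "E": (1, 0), "S": (0, 1), "N": (0, -1)}
--
-- MAX_DIM = int(1E9)
--
-- def normalize(dimension):
--     if dimension > MAX_DIM:
--         dimension %= MAX_DIM
--     if dimension <= 0:
--         dimension = MAX_DIM + dimension
--     return dimension
--
-- def get_displacement(routine, i=0):
--     displ = (0, 0)
--     while i < len(routine):
--         if routine[i].isdigit():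
--             m = int(routine[i])
--             i += 2  # following char is "("
--             ((dw, dh), sr_len) = get_displacement(routine, i)
--             displ = tuple(map(sum, zip(displ, (dw * m, dh * m))))
--             displ = tuple(map(normalize, displ))
--             i = sr_len
--         elif routine[i] == ')':
--             r = tuple([displ, i])
--             return r
--         else:
--             direction = routine[i]
--             step = DIRECTIONS.get(direction, (0, 0))
--             displ = tuple(map(sum, zip(displ, step)))
--         i += 1
--     return (displ, i)
-- ===== SOURCE B (Python) =====
-- DIRECTIONS = {"W": (-1, 0), "E": (1, 0), "S": (0, 1), "N": (0, -1)}
--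
-- MAX_DIM = int(1E9)
--
-- def normalize(dimension):
--     if dimension > MAX_DIM:
--         dimension %= MAX_DIM
--     if dimension <= 0:
--         dimension = MAX_DIM + dimension
--     return dimension
--
-- def get_displacement(routine, i=0):
--     current = (0, 0)
--     stack = []
--     while i < len(routine):
--         c = routine[i]
--         if c.isdigit():
--             stack.append((current, int(c)))
--             current = (0, 0)
--             i += 2  # skip the following "("
--         elif c == ')':
--             if not stack:
--                 return (current, i)
--             saved, m = stack.pop()
--             current = (normalize(saved[0] + current[0] * m),
--                        normalize(saved[1] + current[1] * m))
--             i += 1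
--         else:
--             dx, dy = DIRECTIONS.get(c, (0, 0))
--             current = (current[0] + dx, current[1] + dy)
--             i += 1
--     while stack:
--         saved, m = stack.pop()
--         current = (normalize(saved[0] + current[0] * m),
--                    normalize(saved[1] + current[1] * m))
--         i += 1
--     return (current, i)
-- ===== Notes on version B (the rewrite author's own statement) =====
-- stated objective: alternative
-- what changed: Replaces A's recursion (one Python call per nested group, with the loop re-entered after each return) by a single iterative loop with an explicit stack of (saved position, multiplier) frames, unwinding leftover frames after EOF.
import Mathlib
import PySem

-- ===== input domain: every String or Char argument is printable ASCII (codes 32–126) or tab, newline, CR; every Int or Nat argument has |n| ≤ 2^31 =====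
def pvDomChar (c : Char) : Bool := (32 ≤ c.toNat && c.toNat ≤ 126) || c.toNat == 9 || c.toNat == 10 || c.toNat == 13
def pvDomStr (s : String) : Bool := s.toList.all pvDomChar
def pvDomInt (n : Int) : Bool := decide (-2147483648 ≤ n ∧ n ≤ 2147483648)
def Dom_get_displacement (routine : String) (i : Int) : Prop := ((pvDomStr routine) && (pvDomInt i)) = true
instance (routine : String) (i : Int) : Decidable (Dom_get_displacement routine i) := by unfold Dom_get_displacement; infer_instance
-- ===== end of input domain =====

-- B replaces A's recursive descent by a single explicit-stack loop (alternative decomposition, same cost).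

-- ===== PORT A =====
-- DIRECTIONS as a Python dict; DIRECTIONS.get(c, (0,0))
def pvDirections : PySem.Dict Char (Int × Int) :=
  PySem.Dict.ofList [('W', (-1, 0)), ('E', (1, 0)), ('S', (0, 1)), ('N', (0, -1))]

-- normalize(dimension); '%' with the positive modulus 1000000000 via PySem.Int.mod (exact)
def pvNormalize (dimension : Int) : Int :=
  let d := if dimension > 1000000000 then PySem.Int.mod dimension 1000000000 else dimension
  if d ≤ 0 then 1000000000 + d else d

-- A's while-loop-with-recursion.  The index strictly increases at every step, so `fuel` is a pure
-- totality guard: it never runs out when it starts at pvFuel below.  When routine[i] raises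
-- IndexError in Python (i < -len), pyGet? is none and we
-- return a default: those inputs are excluded by Pre_.
def goA (cs : List Char) (fuel : Nat) (i : Int) (displ : Int × Int) : (Int × Int) × Int :=
  match fuel with
  | 0 => (displ, i)
  | fuel + 1 =>
    if i < (cs.length : Int) then
      match PySem.List.pyGet? cs i with
      | none => (displ, i)  -- Python raises IndexError here (outside Pre_)
      | some c =>
        if PySem.Chars.isdigit c then
          -- m = int(routine[i]) for a single ASCII digit; i += 2; recurse; merge; normalize; i = sr_len + 1
          let r := goA cs fuel (i + 2) (0, 0)
          goA cs fuel (r.2 + 1)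
            (pvNormalize (displ.1 + r.1.1 * ((c.toNat : Int) - 48)),
             pvNormalize (displ.2 + r.1.2 * ((c.toNat : Int) - 48)))
        else if c = ')' then (displ, i)
        else
          let step := pvDirections.getD c (0, 0)
          goA cs fuel (i + 1) (displ.1 + step.1, displ.2 + step.2)
    else (displ, i)

-- enough fuel for any run: every step advances the index by at least 1, indices stay in [-len, 2*len]
def pvFuel (cs : List Char) : Nat := 4 * cs.length + 8

def get_displacement (routine : String) (i : Int) : (Int × Int) × Int :=
  goA routine.toList (pvFuel routine.toList) i (0, 0)

-- ===== PORT B =====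
-- B: one loop, explicit stack of (saved current, multiplier) frames; after EOF the remaining
-- frames are unwound.  Same fuel guard (fuel-irrelevant, goB_fuel_irrel).
def goB (cs : List Char) (fuel : Nat) (i : Int) (cur : Int × Int)
    (st : List ((Int × Int) × Int)) : (Int × Int) × Int :=
  match fuel with
  | 0 => (cur, i)
  | fuel + 1 =>
    if i < (cs.length : Int) then
      match PySem.List.pyGet? cs i with
      | none => (cur, i)  -- Python raises IndexError here (outside Pre_)
      | some c =>
        if PySem.Chars.isdigit c then
          goB cs fuel (i + 2) (0, 0) ((cur, (c.toNat : Int) - 48) :: st)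
        else if c = ')' then
          match st with
          | [] => (cur, i)
          | (saved, m) :: st' =>
            goB cs fuel (i + 1)
              (pvNormalize (saved.1 + cur.1 * m), pvNormalize (saved.2 + cur.2 * m)) st'
        else
          let step := pvDirections.getD c (0, 0)
          goB cs fuel (i + 1) (cur.1 + step.1, cur.2 + step.2) st
    else
      match st with
      | [] => (cur, i)
      | (saved, m) :: st' =>
        goB cs fuel (i + 1)
          (pvNormalize (saved.1 + cur.1 * m), pvNormalize (saved.2 + cur.2 * m)) st'

def get_displacement_alt (routine : String) (i : Int) : (Int × Int) × Int :=
  goB routine.toList (pvFuel routine.toList) i (0, 0) []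

-- ===== PRECONDITION & SPEC =====
-- Pre_ excludes exactly the inputs where Python A raises IndexError: an initial index below -len(routine).
def Pre_get_displacement (routine : String) (i : Int) : Prop := -(routine.length : Int) ≤ i
instance (routine : String) (i : Int) : Decidable (Pre_get_displacement routine i) := by
  unfold Pre_get_displacement; infer_instance

def pvWitness_get_displacement : String × Int := ("2(NE)SS", 0)

def Spec_get_displacement (routine : String) (i : Int) (out : (Int × Int) × Int) : Prop := out = get_displacement_alt routine i
instance (routine : String) (i : Int) (out : (Int × Int) × Int) : Decidable (Spec_get_displacement routine i out) := by unfold Spec_get_displacement; infer_instance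

-- ===== CLAIM (what is proved, stated in full; the proofs are below) =====
def Claim_equal_get_displacement : Prop := ∀ (routine : String) (i : Int), Dom_get_displacement routine i → Pre_get_displacement routine i → Spec_get_displacement routine i (get_displacement routine i)

-- ===== LEMMAS AND PROOFS =====

-- A's result index never decreases below the starting index.
theorem goA_idx_le (cs : List Char) (fuel : Nat) (i : Int) (d : Int × Int) :
    i ≤ (goA cs fuel i d).2 := by
  induction fuel generalizing i d with
  | zero => simp [goA]
  | succ fuel ih =>
      simp only [goA]
      by_cases h : i < (cs.length : Int)
      · simp only [h, if_pos]
        cases hg : PySem.List.pyGet? cs i with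
        | none => simp
        | some c =>
          simp only []
          by_cases hd : PySem.Chars.isdigit c
          · rw [if_pos hd]
            have h1 := ih (i + 2) (0, 0)
            have h2 := ih ((goA cs fuel (i + 2) (0, 0)).2 + 1)
              (pvNormalize (d.1 + (goA cs fuel (i + 2) (0, 0)).1.1 * ((c.toNat : Int) - 48)),
               pvNormalize (d.2 + (goA cs fuel (i + 2) (0, 0)).1.2 * ((c.toNat : Int) - 48)))
            omega
          · rw [if_neg hd]
            by_cases hp : c = ')'
            · rw [if_pos hp]
            · rw [if_neg hp]
              have h2 := ih (i + 1)
                (d.1 + (pvDirections.getD c (0, 0)).1, d.2 + (pvDirections.getD c (0, 0)).2)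
              omega
      · simp [h]

-- any fuel at least (2*(len - i).toNat + st.length + 1) gives the same B-result
theorem goB_fuel_irrel (cs : List Char) (f f' : Nat) (i : Int) (cur : Int × Int)
    (st : List ((Int × Int) × Int))
    (hf : 2 * ((cs.length : Int) - i).toNat + st.length + 1 ≤ f)
    (hf' : 2 * ((cs.length : Int) - i).toNat + st.length + 1 ≤ f') :
    goB cs f i cur st = goB cs f' i cur st := by
  induction f generalizing f' i cur st with
  | zero => omega
  | succ f ih =>
      match f', hf' with
      | f' + 1, hf' =>
        simp only [goB]
        by_cases h : i < (cs.length : Int)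
        · simp only [h, if_pos]
          cases hg : PySem.List.pyGet? cs i with
          | none => rfl
          | some c =>
            simp only []
            by_cases hd : PySem.Chars.isdigit c
            · rw [if_pos hd, if_pos hd]
              exact ih f' (i + 2) (0, 0) ((cur, (c.toNat : Int) - 48) :: st)
                (by simp only [List.length_cons] at hf hf' ⊢; omega)
                (by simp only [List.length_cons] at hf hf' ⊢; omega)
            · rw [if_neg hd, if_neg hd]
              by_cases hp : c = ')'
              · rw [if_pos hp, if_pos hp]
                rcases st with _ | ⟨⟨saved, m⟩, st'⟩
                · rfl
                · exact ih f' (i + 1) _ st'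
                    (by simp only [List.length_cons] at hf hf' ⊢; omega)
                    (by simp only [List.length_cons] at hf hf' ⊢; omega)
              · rw [if_neg hp, if_neg hp]
                exact ih f' (i + 1) _ st (by omega) (by omega)
        · simp only [h, if_false]
          rcases st with _ | ⟨⟨saved, m⟩, st'⟩
          · rfl
          · exact ih f' (i + 1) _ st'
              (by simp only [List.length_cons] at hf hf' ⊢; omega)
              (by simp only [List.length_cons] at hf hf' ⊢; omega)

-- MAIN BRIDGE: running B with pending stack st equals running A from the same point and then
-- merging A's result into the top frame and continuing (uniformly for ')' stop and EOF stop).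
theorem goB_eq_goA (cs : List Char) (f : Nat) (i : Int) (cur : Int × Int)
    (st : List ((Int × Int) × Int))
    (hpre : -(cs.length : Int) ≤ i)
    (hf : 2 * ((cs.length : Int) - i).toNat + st.length + 1 ≤ f) :
    goB cs f i cur st =
      match st with
      | [] => goA cs f i cur
      | (saved, m) :: st' =>
        goB cs f ((goA cs f i cur).2 + 1)
          (pvNormalize (saved.1 + (goA cs f i cur).1.1 * m),
           pvNormalize (saved.2 + (goA cs f i cur).1.2 * m)) st' := by
  induction f generalizing i cur st with
  | zero => omega
  | succ f ih =>
      have hA1 : ((cs.length : Int) - i).toNat + 1 ≤ f + 1 := by omega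
      conv_lhs => simp only [goB]
      by_cases h : i < (cs.length : Int)
      · simp only [h, if_pos]
        cases hg : PySem.List.pyGet? cs i with
        | none =>
          exfalso
          rw [PySem.List.pyGet?_eq_none_iff] at hg
          exact hg (by constructor <;> omega)
        | some c =>
          simp only []
          by_cases hd : PySem.Chars.isdigit c
          · -- digit: B pushes a frame; A recurses and continues after the matching point
            rw [if_pos hd]
            have hrec := ih (i + 2) (0, 0) ((cur, (c.toNat : Int) - 48) :: st)
              (by omega) (by simp only [List.length_cons] at hf ⊢; omega)
            simp only at hrec
            rw [hrec]
            have hidx := goA_idx_le cs f (i + 2) ((0 : Int), (0 : Int))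
            have hcont := ih ((goA cs f (i + 2) (0, 0)).2 + 1)
              (pvNormalize (cur.1 + (goA cs f (i + 2) (0, 0)).1.1 * ((c.toNat : Int) - 48)),
               pvNormalize (cur.2 + (goA cs f (i + 2) (0, 0)).1.2 * ((c.toNat : Int) - 48))) st
              (by omega) (by omega)
            rw [hcont]
            -- unfold A one step on the right and lift B's fuel from f to f+1 where needed
            have hAstep : goA cs (f + 1) i cur =
                goA cs f ((goA cs f (i + 2) (0, 0)).2 + 1)
                  (pvNormalize (cur.1 + (goA cs f (i + 2) (0, 0)).1.1 * ((c.toNat : Int) - 48)),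
                   pvNormalize (cur.2 + (goA cs f (i + 2) (0, 0)).1.2 * ((c.toNat : Int) - 48))) := by
              conv_lhs => simp only [goA]
              simp only [h, if_pos, hg]
              rw [if_pos hd]
            rcases st with _ | ⟨⟨saved, m⟩, st'⟩
            · simp only []; rw [hAstep]
            · simp only []
              rw [hAstep]
              have hidx2 := goA_idx_le cs f ((goA cs f (i + 2) (0, 0)).2 + 1)
                (pvNormalize (cur.1 + (goA cs f (i + 2) (0, 0)).1.1 * ((c.toNat : Int) - 48)),
                 pvNormalize (cur.2 + (goA cs f (i + 2) (0, 0)).1.2 * ((c.toNat : Int) - 48)))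
              exact goB_fuel_irrel cs f (f + 1) _ _ st'
                (by simp only [List.length_cons] at hf ⊢; omega)
                (by simp only [List.length_cons] at hf ⊢; omega)
          · rw [if_neg hd]
            have hAeq : goA cs (f + 1) i cur =
                if c = ')' then (cur, i)
                else goA cs f (i + 1)
                  (cur.1 + (pvDirections.getD c (0, 0)).1, cur.2 + (pvDirections.getD c (0, 0)).2) := by
              conv_lhs => simp only [goA]
              simp only [h, if_pos, hg]
              rw [if_neg hd]
            by_cases hp : c = ')'
            · rw [if_pos hp]
              rw [hAeq, if_pos hp]
              rcases st with _ | ⟨⟨saved, m⟩, st'⟩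
              · rfl
              · simp only []
                exact goB_fuel_irrel cs f (f + 1) _ _ st'
                  (by simp only [List.length_cons] at hf ⊢; omega)
                  (by simp only [List.length_cons] at hf ⊢; omega)
            · rw [if_neg hp]
              rw [hAeq, if_neg hp]
              have hrec := ih (i + 1)
                (cur.1 + (pvDirections.getD c (0, 0)).1, cur.2 + (pvDirections.getD c (0, 0)).2) st
                (by omega) (by omega)
              rw [hrec]
              rcases st with _ | ⟨⟨saved, m⟩, st'⟩
              · rfl
              · simp only []
                have hidx := goA_idx_le cs f (i + 1)
                  (cur.1 + (pvDirections.getD c (0, 0)).1, cur.2 + (pvDirections.getD c (0, 0)).2)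
                exact goB_fuel_irrel cs f (f + 1) _ _ st'
                  (by simp only [List.length_cons] at hf ⊢; omega)
                  (by simp only [List.length_cons] at hf ⊢; omega)
      · -- EOF: A returns; B unwinds the remaining frames, one index bump per frame
        have hAeof : goA cs (f + 1) i cur = (cur, i) := by simp only [goA]; simp [h]
        simp only [h, if_false]
        rcases st with _ | ⟨⟨saved, m⟩, st'⟩
        · rw [hAeof]
        · simp only []
          rw [hAeof]
          exact goB_fuel_irrel cs f (f + 1) _ _ st'
            (by simp only [List.length_cons] at hf ⊢; omega)
            (by simp only [List.length_cons] at hf ⊢; omega)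

-- ===== VERDICT (by name: the statement is the Claim_ definition above) =====
theorem get_displacement_spec : Claim_equal_get_displacement := by
  intro routine i _ hpre
  unfold Spec_get_displacement get_displacement get_displacement_alt
  have hpre' : -(routine.toList.length : Int) ≤ i := by
    simpa [Pre_get_displacement] using hpre
  have h := goB_eq_goA routine.toList (pvFuel routine.toList) i (0, 0) [] hpre'
    (by simp only [pvFuel, List.length_nil]; omega)
  simp only [] at h
  exact h.symm
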